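-- pv_equiv track=rewrite | github.com/mkierc/advent-of-code | 2017/src/day_02/part_1.py | find_extremes_difference
-- ===== SOURCE A (Python) =====
-- def find_extremes_difference(row):
--     lowest = row[0]
--     highest = row[0]
--     for number in row:
--         if number < lowest:
--             lowest = number
--         if number > highest:
--             highest = number
--     return highest - lowest
-- ===== SOURCE B (Python) =====
-- def find_extremes_difference(row):
--     s = sorted(row)
--     return s[-1] - s[0]
-- ===== Notes on version B (the rewrite author's own statement) =====
-- stated objective: idiomatic
-- what changed: B sorts the row once and subtracts the first sorted element from the last, replacing A's single-pass running min/max tracking.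
import Mathlib
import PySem

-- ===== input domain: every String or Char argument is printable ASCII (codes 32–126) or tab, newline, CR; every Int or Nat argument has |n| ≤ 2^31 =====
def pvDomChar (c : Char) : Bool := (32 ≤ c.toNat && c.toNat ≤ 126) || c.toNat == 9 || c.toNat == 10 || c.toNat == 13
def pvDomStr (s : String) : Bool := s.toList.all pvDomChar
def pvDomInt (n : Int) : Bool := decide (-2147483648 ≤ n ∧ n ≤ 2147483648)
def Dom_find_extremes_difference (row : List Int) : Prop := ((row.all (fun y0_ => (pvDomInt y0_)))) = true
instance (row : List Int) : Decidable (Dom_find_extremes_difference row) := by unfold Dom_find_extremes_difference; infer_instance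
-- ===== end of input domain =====

-- B sorts the row once and reads the extremes by index (s[-1] - s[0]), replacing A's single-pass running min/max; return values agree on every non-empty row.

-- ===== PORT A =====
-- lowest = highest = row[0]; one pass updating both; row[0] raises on [] (excluded by Pre_), the none branch is unreachable there.
def find_extremes_difference (row : List Int) : Int :=
  match PySem.List.pyGet? row 0 with
  | none => 0
  | some h =>
    let p := row.foldl
      (fun (p : Int × Int) number =>
        (if number < p.1 then number else p.1,
         if number > p.2 then number else p.2)) (h, h)
    p.2 - p.1

-- ===== PORT B =====
-- s = sorted(row); s[-1] - s[0]; indexing raises on [] (excluded by Pre_), the fallback branch is unreachable there.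
def find_extremes_difference_alt (row : List Int) : Int :=
  let s := PySem.List.sorted row (fun x => x) false
  match PySem.List.pyGet? s (-1), PySem.List.pyGet? s 0 with
  | some hi, some lo => hi - lo
  | _, _ => 0

-- ===== PRECONDITION & SPEC =====
-- Pre_ excludes only the empty row, on which both Pythons raise IndexError.
def Pre_find_extremes_difference (row : List Int) : Prop := row ≠ []
instance (row : List Int) : Decidable (Pre_find_extremes_difference row) := by unfold Pre_find_extremes_difference; infer_instance
def pvWitness_find_extremes_difference : List Int := ([5, 1, 9, 7])

def Spec_find_extremes_difference (row : List Int) (out : Int) : Prop := out = find_extremes_difference_alt row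
instance (row : List Int) (out : Int) : Decidable (Spec_find_extremes_difference row out) := by unfold Spec_find_extremes_difference; infer_instance

-- ===== CLAIM (what is proved, stated in full; the proofs are below) =====
def Claim_equal_find_extremes_difference : Prop := ∀ (row : List Int), Dom_find_extremes_difference row → Pre_find_extremes_difference row → Spec_find_extremes_difference row (find_extremes_difference row)

-- ===== LEMMAS AND PROOFS =====

-- A's fold computes (foldl min, foldl max).
theorem foldA_eq_min_max (l : List Int) (lo hi : Int) :
    l.foldl (fun (p : Int × Int) number =>
        (if number < p.1 then number else p.1,
         if number > p.2 then number else p.2)) (lo, hi)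
      = (l.foldl min lo, l.foldl max hi) := by
  induction l generalizing lo hi with
  | nil => rfl
  | cons x xs ih =>
      simp only [List.foldl_cons]
      have h1 : (if x < lo then x else lo) = min lo x := by split_ifs <;> omega
      have h2 : (if x > hi then x else hi) = max hi x := by split_ifs <;> omega
      rw [h1, h2, ih]

theorem foldl_min_mem : ∀ (l : List Int) (a : Int), l.foldl min a ∈ a :: l := by
  intro l
  induction l with
  | nil => simp
  | cons x xs ih =>
      intro a
      simp only [List.foldl_cons]
      rcases List.mem_cons.mp (ih (min a x)) with h | h
      · rw [h]; rcases min_cases a x with ⟨he, -⟩ | ⟨he, -⟩ <;> simp [he]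
      · simp [h]

theorem foldl_min_le : ∀ (l : List Int) (a : Int), ∀ y ∈ a :: l, l.foldl min a ≤ y := by
  intro l
  induction l with
  | nil => simp
  | cons x xs ih =>
      intro a y hy
      simp only [List.foldl_cons]
      rcases List.mem_cons.mp hy with h | h
      · rw [h]
        exact le_trans (ih (min a x) (min a x) (by simp)) (min_le_left a x)
      · rcases List.mem_cons.mp h with h' | h'
        · rw [h']
          exact le_trans (ih (min a x) (min a x) (by simp)) (min_le_right a x)
        · exact ih (min a x) y (by simp [h'])

theorem foldl_max_mem : ∀ (l : List Int) (a : Int), l.foldl max a ∈ a :: l := by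
  intro l
  induction l with
  | nil => simp
  | cons x xs ih =>
      intro a
      simp only [List.foldl_cons]
      rcases List.mem_cons.mp (ih (max a x)) with h | h
      · rw [h]; rcases max_cases a x with ⟨he, -⟩ | ⟨he, -⟩ <;> simp [he]
      · simp [h]

theorem foldl_max_ge : ∀ (l : List Int) (a : Int), ∀ y ∈ a :: l, y ≤ l.foldl max a := by
  intro l
  induction l with
  | nil => simp
  | cons x xs ih =>
      intro a y hy
      simp only [List.foldl_cons]
      rcases List.mem_cons.mp hy with h | h
      · rw [h]
        exact le_trans (le_max_left a x) (ih (max a x) (max a x) (by simp))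
      · rcases List.mem_cons.mp h with h' | h'
        · rw [h']
          exact le_trans (le_max_right a x) (ih (max a x) (max a x) (by simp))
        · exact ih (max a x) y (by simp [h'])

-- In a (≤)-pairwise list the last element bounds every member from above.
theorem pairwise_le_getLast : ∀ (l : List Int) (h : l ≠ []), l.Pairwise (· ≤ ·) → ∀ y ∈ l, y ≤ l.getLast h := by
  intro l
  induction l with
  | nil => intro h; exact absurd rfl h
  | cons x xs ih =>
      intro _ hp y hy
      rcases hp with - | ⟨hx, hxs⟩
      cases xs with
      | nil => simp at hy; simp [hy]
      | cons z zs =>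
          rw [List.getLast_cons (by simp)]
          rcases List.mem_cons.mp hy with h' | h'
          · subst h'
            exact le_trans (hx z (by simp)) (ih (by simp) hxs z (by simp))
          · exact ih (by simp) hxs y h'

theorem find_extremes_equiv (row : List Int) (hrow : row ≠ []) :
    find_extremes_difference row = find_extremes_difference_alt row := by
  obtain ⟨x, xs, rfl⟩ := List.exists_cons_of_ne_nil hrow
  -- the sorted list is non-empty
  have hsne : PySem.List.sorted (x :: xs) (fun x => x) false ≠ [] := by
    intro h
    exact (List.cons_ne_nil x xs) ((PySem.List.sorted_eq_nil_iff _ _ _).mp h)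
  obtain ⟨m, t, hs⟩ := List.exists_cons_of_ne_nil hsne
  have hperm : (PySem.List.sorted (x :: xs) (fun x => x) false).Perm (x :: xs) :=
    PySem.List.sorted_perm _ _ _
  have hmem_iff : ∀ y, y ∈ PySem.List.sorted (x :: xs) (fun x => x) false ↔ y ∈ x :: xs :=
    fun y => hperm.mem_iff
  -- head of sorted is the minimum
  have hm_mem : m ∈ x :: xs := (hmem_iff m).mp (by simp [hs])
  have hm_le : ∀ y ∈ x :: xs, m ≤ y := by
    intro y hy
    exact PySem.List.key_head_sorted_le _ _ hs y hy
  -- last of sorted is the maximum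
  set s := PySem.List.sorted (x :: xs) (fun x => x) false with hsdef
  have hpw : s.Pairwise (· ≤ ·) := PySem.List.sorted_pairwise _ _
  have hlast_mem : s.getLast hsne ∈ x :: xs := (hmem_iff _).mp (List.getLast_mem hsne)
  have hlast_ge : ∀ y ∈ x :: xs, y ≤ s.getLast hsne := by
    intro y hy
    exact pairwise_le_getLast s hsne hpw y ((hmem_iff y).mpr hy)
  -- A's fold values
  have hA := foldA_eq_min_max xs x x
  have hmin_eq : xs.foldl min x = m := by
    have h1 : xs.foldl min x ≤ m := foldl_min_le xs x m hm_mem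
    have h2 : m ≤ xs.foldl min x := hm_le _ (foldl_min_mem xs x)
    omega
  have hmax_eq : xs.foldl max x = s.getLast hsne := by
    have h1 : xs.foldl max x ≤ s.getLast hsne := hlast_ge _ (foldl_max_mem xs x)
    have h2 : s.getLast hsne ≤ xs.foldl max x := foldl_max_ge xs x _ hlast_mem
    omega
  -- evaluate both sides
  have hget0 : PySem.List.pyGet? s 0 = some m := by simp [hs]
  have hgetneg : PySem.List.pyGet? s (-1) = some (s.getLast hsne) := by
    rw [PySem.List.pyGet?_neg_one]
    exact List.getLast?_eq_some_getLast hsne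
  show find_extremes_difference (x :: xs) = find_extremes_difference_alt (x :: xs)
  unfold find_extremes_difference find_extremes_difference_alt
  rw [PySem.List.pyGet?_zero_cons]
  simp only [← hsdef, hgetneg, hget0, List.foldl_cons]
  have hstep : (if x < x then x else x, if x > x then x else x) = (x, x) := by simp
  rw [hstep, hA, hmin_eq, hmax_eq]

-- ===== VERDICT (by name: the statement is the Claim_ definition above) =====
theorem find_extremes_difference_spec : Claim_equal_find_extremes_difference := by
  intro row _ hpre
  exact find_extremes_equiv row hpre
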